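-- pv_equiv track=rewrite | github.com/TizianoLP/TPs-Algo1 | TP 1/unruly.py | grilla_terminada
-- ===== SOURCE A (Python) =====
-- from typing import List, Tuple, Any
--
-- Grilla = Any
--
-- def fila_es_valida(grilla: Grilla, fil: int) -> bool:
--     """Devuelve un booleano indicando si la fila de la grilla denotada por el
--     índice `fil` es considerada válida.
--
--     Una fila válida cuando se cumplen todas estas condiciones:
--         - La fila no tiene vacíos
--         - La fila tiene la misma cantidad de unos y ceros
--         - La fila no contiene tres casilleros consecutivos del mismo valor
--     """
--     res0=0
--     res1=0
--     for n in grilla[fil]: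
--         if n=="1":
--             res1+=1
--         elif n==" ":
--             return False
--         else:
--             res0+=1
--     #Verifica que haya la misma cantidad de 0 que 1
--     if res0!=res1:
--         return False
--     #Verifica que no haya 3 o mas numeros iguales seguidos
--     if "111" in "".join(grilla[fil]) or "000" in "".join(grilla[fil]):
--         return False
--     else:
--         return True
--
-- def columna_es_valida(grilla: Grilla, col: int) -> bool:
--     """Devuelve un booleano indicando si la columna de la grilla denotada por
--     el índice `col` es considerada válida.
--
--     Las condiciones para que una columna sea válida son las mismas que las
--     condiciones de las filas."""
--     res0=0
--     res1=0
--     cont=" "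
--     for fil in range(len(grilla[0])):
--         for col in range(len(grilla)):
--             cont+=grilla[col][fil]
--             n=grilla[col][fil]
--             if n=="1":
--                 res1+=1
--             elif n==" ":
--                 return False
--             else:
--                 res0+=1
--         cont+=" "
--         if res0!=res1:
--             return False
--     if "111" in cont or "000" in cont:
--         return False
--     else:
--         return True
--
-- def grilla_terminada(grilla: Grilla) -> bool:
--     """Devuelve un booleano indicando si la grilla se encuentra terminada.
--
--     Una grilla se considera terminada si todas sus filas y columnas son
--     válidas."""
--     for fil in range(len(grilla)):
--         #Si las filas son validas...
--         if fila_es_valida(grilla,fil)!=True: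
--             return False
--     for col in range(len(grilla[0])):
--         #Y las columnas tambien...
--         if columna_es_valida(grilla,col)!=True:
--             return False
--     else:
--         #Devuelve True, porque esta todo correcto
--         return True
-- ===== SOURCE B (Python) =====
-- def grilla_terminada(grilla):
--     """Una grilla esta terminada si todas sus filas y columnas son validas.
--
--     Re-implementation: one helper validates any line (row or column) given as
--     a list of cells; columns are materialised once each, instead of A's
--     repeated whole-grid cumulative scan per column.
--     """
--     def valida(cells):
--         if " " in cells:
--             return False
--         if 2 * cells.count("1") != len(cells):
--             return False
--         s = "".join(cells)
--         return "111" not in s and "000" not in s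
--
--     if not all(valida(fila) for fila in grilla):
--         return False
--     ncols = len(grilla[0])
--     return all(valida([fila[c] for fila in grilla]) for c in range(ncols))
-- ===== Notes on version B (the rewrite author's own statement) =====
-- stated objective: simpler
-- what changed: One short helper validates any line of cells (membership/count/substring tests on the joined string); columns are materialised once each instead of A's cumulative whole-grid column-major scan repeated once per column.
-- outside the precondition, e.g. on grilla_terminada([['1', '0', '0', '1'], ['0', '1'], ['1', '0', '0', '1']]): A returns False, B returns False
import Mathlib
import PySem

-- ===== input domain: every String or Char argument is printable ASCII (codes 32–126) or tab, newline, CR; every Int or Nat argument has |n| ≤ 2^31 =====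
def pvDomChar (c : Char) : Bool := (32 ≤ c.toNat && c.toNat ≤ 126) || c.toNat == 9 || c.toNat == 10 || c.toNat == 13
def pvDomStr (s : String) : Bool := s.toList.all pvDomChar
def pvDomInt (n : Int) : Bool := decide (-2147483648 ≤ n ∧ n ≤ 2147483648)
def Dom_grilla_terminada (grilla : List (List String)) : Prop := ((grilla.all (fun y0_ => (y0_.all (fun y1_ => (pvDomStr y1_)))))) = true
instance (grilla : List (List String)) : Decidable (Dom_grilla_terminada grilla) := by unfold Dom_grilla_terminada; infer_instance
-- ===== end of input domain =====

-- B (simpler): one helper validates any line of cells; columns are built once each instead of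
-- A's cumulative whole-grid column-major scan repeated once per column.


-- ===== PORT A =====
-- strings are handled on the List Char side (PySem.Chars), exact for Python str concat/join/'in'

-- the counting loop of fila_es_valida: none = the early 'return False' on a ' ' cell
def pvFilaLoop : List String → Int → Int → Option (Int × Int)
  | [], res0, res1 => some (res0, res1)
  | n :: rest, res0, res1 =>
    if n = "1" then pvFilaLoop rest res0 (res1 + 1)
    else if n = " " then none
    else pvFilaLoop rest (res0 + 1) res1

def fila_es_valida (grilla : List (List String)) (fil : Int) : Bool :=
  -- Pre_ ensures the index is in range, so the .getD default is never read
  let row := (PySem.List.pyGet? grilla fil).getD []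
  match pvFilaLoop row 0 0 with
  | none => false
  | some (res0, res1) =>
    if res0 ≠ res1 then false
    else
      let j := PySem.Chars.join [] (row.map String.toList)
      if PySem.Chars.isIn "111".toList j || PySem.Chars.isIn "000".toList j then false else true

-- the cell grilla[col][fil]; indexing via getD: Pre_ keeps every access in range
def pvCell (grilla : List (List String)) (fil c : Nat) : String :=
  (grilla.getD c []).getD fil " "

-- inner loop of columna_es_valida (over col = row index); none = early 'return False' on ' '
def pvColInner (grilla : List (List String)) (fil : Nat) :
    List Nat → List Char → Int → Int → Option (List Char × Int × Int)
  | [], cont, res0, res1 => some (cont, res0, res1)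
  | col :: rest, cont, res0, res1 =>
    let n := pvCell grilla fil col
    let cont' := cont ++ n.toList
    if n = "1" then pvColInner grilla fil rest cont' res0 (res1 + 1)
    else if n = " " then none
    else pvColInner grilla fil rest cont' (res0 + 1) res1

-- outer loop of columna_es_valida (over fil = column index), then the final triple check
def pvColOuter (grilla : List (List String)) :
    List Nat → List Char → Int → Int → Bool
  | [], cont, _, _ =>
    if PySem.Chars.isIn "111".toList cont || PySem.Chars.isIn "000".toList cont then false else true
  | fil :: rest, cont, res0, res1 =>
    match pvColInner grilla fil (List.range grilla.length) cont res0 res1 with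
    | none => false
    | some (cont', res0', res1') =>
      let cont'' := cont' ++ [' ']
      if res0' ≠ res1' then false else pvColOuter grilla rest cont'' res0' res1'

def columna_es_valida (grilla : List (List String)) (_col : Int) : Bool :=
  -- the Python function shadows and never uses its col parameter
  pvColOuter grilla (List.range ((grilla.getD 0 []).length)) [' '] 0 0

def grilla_terminada (grilla : List (List String)) : Bool :=
  if (List.range grilla.length).all (fun fil => fila_es_valida grilla (fil : Int)) then
    if (List.range ((grilla.getD 0 []).length)).all
        (fun col => columna_es_valida grilla (col : Int)) then true
    else false
  else false

-- ===== PORT B =====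
def pvValida (cells : List String) : Bool :=
  if cells.contains " " then false
  else if 2 * (PySem.List.count cells "1") ≠ cells.length then false
  else
    let s := PySem.Chars.join [] (cells.map String.toList)
    !(PySem.Chars.isIn "111".toList s) && !(PySem.Chars.isIn "000".toList s)

def grilla_terminada_alt (grilla : List (List String)) : Bool :=
  if !(grilla.all pvValida) then false
  else
    -- Pre_ ensures grilla ≠ [] and every row reaches column c < ncols
    let ncols := (grilla.getD 0 []).length
    (List.range ncols).all (fun c => pvValida (grilla.map (fun fila => fila.getD c " ")))

-- ===== PRECONDITION & SPEC =====
-- Pre_ excludes the empty grid (grilla[0] raises IndexError) and ragged grids whose rows are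
-- all individually valid although some row is shorter than the first: there A's column-major
-- scan raises IndexError, or happens to return False early when a cumulatively unbalanced
-- column precedes the missing cell (see the cited example).
def Pre_grilla_terminada (grilla : List (List String)) : Prop :=
  grilla ≠ [] ∧
    ((∀ row ∈ grilla, (grilla.headI).length ≤ row.length) ∨
     (∃ row ∈ grilla, " " ∈ row ∨ 2 * List.count "1" row ≠ row.length ∨
        "111".toList <:+: PySem.Chars.join [] (row.map String.toList) ∨
        "000".toList <:+: PySem.Chars.join [] (row.map String.toList)))
instance (grilla : List (List String)) : Decidable (Pre_grilla_terminada grilla) := by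
  unfold Pre_grilla_terminada; infer_instance
def pvWitness_grilla_terminada : List (List String) := [["1", "0"], ["0", "1"]]

def Spec_grilla_terminada (grilla : List (List String)) (out : Bool) : Prop := out = grilla_terminada_alt grilla
instance (grilla : List (List String)) (out : Bool) : Decidable (Spec_grilla_terminada grilla out) := by unfold Spec_grilla_terminada; infer_instance

-- ===== CLAIM (what is proved, stated in full; the proofs are below) =====
def Claim_equal_grilla_terminada : Prop := ∀ (grilla : List (List String)), Dom_grilla_terminada grilla → Pre_grilla_terminada grilla → Spec_grilla_terminada grilla (grilla_terminada grilla)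

-- ===== LEMMAS AND PROOFS =====

-- characterisation of A's row-counting loop
theorem pvFilaLoop_eq (cells : List String) (r0 r1 : Int) :
    pvFilaLoop cells r0 r1 =
      if " " ∈ cells then none
      else some (r0 + (cells.countP (fun n => !(n == "1")) : Int), r1 + (cells.count "1" : Int)) := by
  induction cells generalizing r0 r1 with
  | nil => simp [pvFilaLoop]
  | cons n rest ih =>
    simp only [pvFilaLoop, List.count_cons, List.countP_cons, List.mem_cons]
    by_cases hs : " " ∈ rest <;>
    by_cases h1 : n = "1" <;>
    by_cases h2 : n = " " <;>
      first
      | (simp_all [ih] <;> push_cast <;> omega)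
      | (simp_all [ih]; done)
      | (simp_all [ih]; exact ⟨fun h => h2 h.symm, by push_cast; ring⟩)

-- counts of "1" and non-"1" cells sum to the line length
theorem pvCountSplit (row : List String) :
    (List.countP (fun n => !(n == "1")) row) + (List.count "1" row) = row.length := by
  have h1 := List.length_eq_countP_add_countP (p := fun n : String => (n == "1")) (l := row)
  have h2 : List.countP (fun a : String => decide ¬((a == "1") = true)) row
      = List.countP (fun n : String => !(n == "1")) row := by
    apply List.countP_congr; intro a _; by_cases h : a = "1" <;> simp [h]
  simp only [List.count] at *
  omega

-- row validity: A's helper equals B's helper on the fetched row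
theorem fila_eq_valida (grilla : List (List String)) (i : Nat) (row : List String)
    (h : grilla[i]? = some row) :
    fila_es_valida grilla (i : Int) = pvValida row := by
  have hb := pvCountSplit row
  simp only [fila_es_valida, PySem.List.pyGet?_natCast, h, Option.getD_some, pvFilaLoop_eq]
  by_cases hs : " " ∈ row
  · simp [pvValida, hs]
  · simp only [if_neg hs, pvValida]
    have hc : row.contains " " = false := by simp_all
    rw [hc]
    simp only [Bool.false_eq_true, if_false, PySem.List.count_eq, zero_add]
    by_cases he : (List.countP (fun n => !(n == "1")) row : Int) = (List.count "1" row : Int)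
    · rw [if_neg (by omega : ¬ ((List.countP (fun n => !(n == "1")) row : Int) ≠ (List.count "1" row : Int))),
         if_neg (by omega : ¬ (2 * List.count "1" row ≠ row.length))]
      cases ha : PySem.Chars.isIn "111".toList (PySem.Chars.join [] (row.map String.toList)) <;>
      cases hb' : PySem.Chars.isIn "000".toList (PySem.Chars.join [] (row.map String.toList)) <;>
        simp [ha, hb']
    · rw [if_pos he, if_pos (by omega : 2 * List.count "1" row ≠ row.length)]

-- phase 1: A's indexed row loop equals B's all-rows check
theorem rows_eq (grilla : List (List String)) :
    (List.range grilla.length).all (fun fil => fila_es_valida grilla (fil : Int)) =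
      grilla.all pvValida := by
  rw [Bool.eq_iff_iff]
  simp only [List.all_eq_true, List.mem_range]
  constructor
  · intro hall row hrow
    obtain ⟨i, hi, hrw⟩ := List.mem_iff_getElem.mp hrow
    have := hall i hi
    rwa [fila_eq_valida grilla i row (by simp [hi, hrw])] at this
  · intro hall i hi
    rw [fila_eq_valida grilla i grilla[i] (by simp [hi])]
    exact hall _ (List.getElem_mem hi)

-- the cells of column fil over the row indices in cols
def pvColCells (grilla : List (List String)) (fil : Nat) (cols : List Nat) : List String :=
  cols.map (pvCell grilla fil)

theorem join_nil_cons (a : List Char) (l : List (List Char)) :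
    PySem.Chars.join [] (a :: l) = a ++ PySem.Chars.join [] l := by
  cases l with
  | nil => simp [PySem.Chars.join_singleton, PySem.Chars.join_nil]
  | cons b r => rw [PySem.Chars.join_cons_cons]; simp

-- characterisation of A's inner column loop when no cell is ' '
theorem pvColInner_eq (grilla : List (List String)) (fil : Nat) (cols : List Nat)
    (cont : List Char) (r0 r1 : Int)
    (hns : ∀ c ∈ cols, pvCell grilla fil c ≠ " ") :
    pvColInner grilla fil cols cont r0 r1 =
      some (cont ++ PySem.Chars.join [] ((pvColCells grilla fil cols).map String.toList),
        r0 + ((pvColCells grilla fil cols).countP (fun n => !(n == "1")) : Int),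
        r1 + ((pvColCells grilla fil cols).count "1" : Int)) := by
  induction cols generalizing cont r0 r1 with
  | nil => simp [pvColInner, pvColCells, PySem.Chars.join_nil]
  | cons c rest ih =>
    have hcell := hns c (by simp)
    simp only [pvColInner, pvColCells, List.map_cons, List.map_map, join_nil_cons]
    by_cases h1 : pvCell grilla fil c = "1"
    · rw [if_pos (by simpa [pvCell] using h1)]
      rw [ih _ _ _ (fun x hx => hns x (by simp [hx]))]
      simp [pvColCells, List.count_cons, List.countP_cons, h1]
      push_cast; omega
    · rw [if_neg (by simpa [pvCell] using h1), if_neg (by simpa [pvCell] using hcell)]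
      rw [ih _ _ _ (fun x hx => hns x (by simp [hx]))]
      simp [pvColCells, List.count_cons, List.countP_cons, h1]
      push_cast; omega

-- the joined cells of full column f, and the ' '-separated blocks A's cont accumulates
def pvColJoin (grilla : List (List String)) (f : Nat) : List Char :=
  PySem.Chars.join [] ((pvColCells grilla f (List.range grilla.length)).map String.toList)

def pvBlocks (grilla : List (List String)) (fils : List Nat) : List Char :=
  (fils.map (fun f => pvColJoin grilla f ++ [' '])).flatten

-- a space-free prefix of a ++ ' ' :: b is a prefix of a
theorem prefix_split (t a b : List Char) (h : ' ' ∉ t) (hp : t <+: a ++ ' ' :: b) :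
    t <+: a := by
  induction a generalizing t with
  | nil =>
    cases t with
    | nil => exact List.nil_prefix
    | cons c ts =>
      exfalso
      obtain ⟨u, hu⟩ := hp
      simp at hu
      exact h (by simp [hu.1])
  | cons x a' ih =>
    cases t with
    | nil => exact List.nil_prefix
    | cons c ts =>
      rw [List.cons_append] at hp
      rw [List.cons_prefix_cons] at hp ⊢
      exact ⟨hp.1, ih ts (fun hm => h (by simp [hm])) hp.2⟩

-- a space-free substring of a ++ ' ' :: b lies in a or in b
theorem infix_split_fwd (b : List Char) :
    ∀ (a t : List Char), ' ' ∉ t → t <:+: a ++ ' ' :: b → t <:+: a ∨ t <:+: b := by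
  intro a
  induction a with
  | nil =>
    intro t h hi
    rw [List.nil_append, List.infix_cons_iff] at hi
    rcases hi with hp | hi
    · cases t with
      | nil => exact Or.inl List.nil_infix
      | cons c ts =>
        rw [List.cons_prefix_cons] at hp
        exact absurd (by simp [hp.1]) h
    · exact Or.inr hi
  | cons x a' ih =>
    intro t h hi
    rw [List.cons_append, List.infix_cons_iff] at hi
    rcases hi with hp | hi
    · cases t with
      | nil => exact Or.inl List.nil_infix
      | cons c ts =>
        rw [List.cons_prefix_cons] at hp
        have hts := prefix_split ts a' b (fun hm => h (by simp [hm])) hp.2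
        exact Or.inl (List.cons_prefix_cons.mpr ⟨hp.1, hts⟩).isInfix
    · rcases ih t h hi with h1 | h2
      · exact Or.inl (List.infix_cons h1)
      · exact Or.inr h2

theorem isIn_split (t a b : List Char) (h : ' ' ∉ t) :
    PySem.Chars.isIn t (a ++ ' ' :: b) = (PySem.Chars.isIn t a || PySem.Chars.isIn t b) := by
  rw [Bool.eq_iff_iff]
  simp only [Bool.or_eq_true, PySem.Chars.isIn_iff_infix]
  constructor
  · exact infix_split_fwd b a t h
  · rintro (h1 | h2)
    · exact h1.trans (List.prefix_append a (' ' :: b)).isInfix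
    · exact h2.trans (((List.suffix_cons ' ' b).trans (List.suffix_append a (' ' :: b))).isInfix)

-- a space-free nonempty substring of the ' '-separated blocks is a substring of some block
theorem isIn_blocks (grilla : List (List String)) (t : List Char) (h : ' ' ∉ t)
    (hne : t ≠ []) (fils : List Nat) :
    PySem.Chars.isIn t (pvBlocks grilla fils) =
      fils.any (fun f => PySem.Chars.isIn t (pvColJoin grilla f)) := by
  induction fils with
  | nil =>
    rw [Bool.eq_iff_iff]
    simp [pvBlocks, PySem.Chars.isIn_iff_infix, hne]
  | cons f r ih =>
    have hb : pvBlocks grilla (f :: r) = pvColJoin grilla f ++ ' ' :: pvBlocks grilla r := by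
      simp [pvBlocks]
    rw [hb, isIn_split _ _ _ h, ih]
    simp

-- characterisation of A's outer column loop when no scanned cell is ' '
theorem pvColOuter_eq (grilla : List (List String)) (fils : List Nat)
    (hns : ∀ f ∈ fils, ∀ c ∈ List.range grilla.length, pvCell grilla f c ≠ " ") :
    ∀ (cont : List Char) (r0 : Int),
    pvColOuter grilla fils cont r0 r0 =
      ((fils.all (fun f => (pvColCells grilla f (List.range grilla.length)).countP (fun n => !(n == "1"))
          == (pvColCells grilla f (List.range grilla.length)).count "1")) &&
       !(PySem.Chars.isIn "111".toList (cont ++ pvBlocks grilla fils) ||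
         PySem.Chars.isIn "000".toList (cont ++ pvBlocks grilla fils))) := by
  induction fils with
  | nil =>
    intro cont r0
    simp only [pvColOuter, pvBlocks, List.map_nil, List.flatten_nil, List.append_nil,
      List.all_nil, Bool.true_and]
    cases PySem.Chars.isIn "111".toList cont <;> cases PySem.Chars.isIn "000".toList cont <;> simp
  | cons f r ih =>
    intro cont r0
    have hf := hns f (by simp)
    rw [pvColOuter, pvColInner_eq grilla f _ cont r0 r0 (fun c hc => hf c hc)]
    set L := pvColCells grilla f (List.range grilla.length) with hL
    dsimp only
    by_cases hbal : L.countP (fun n => !(n == "1")) = L.count "1"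
    · rw [if_neg (by simp [hbal])]
      rw [show (List.count "1" L : Nat) = L.countP (fun n => !(n == "1")) from hbal.symm]
      rw [ih (fun f' hf' => hns f' (by simp [hf'])) _ _]
      have hblk : pvBlocks grilla (f :: r) = pvColJoin grilla f ++ ' ' :: pvBlocks grilla r := by
        simp [pvBlocks]
      simp only [hblk, List.all_cons, hbal, beq_self_eq_true, Bool.true_and, pvColJoin, ← hL]
      congr 2 <;> simp [List.append_assoc]
    · rw [if_pos (fun hh : (_ : Int) = _ => hbal (by exact_mod_cast add_left_cancel hh))]
      have hc : (L.countP (fun n => !(n == "1")) == L.count "1") = false := by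
        simp [hbal]
      simp [hc, ← hL]

-- B's column construction is A's cell-by-cell column
theorem map_range_getD {α β : Type} (l : List α) (F : α → β) (d : α) :
    (List.range l.length).map (fun i => F (l.getD i d)) = l.map F := by
  induction l with
  | nil => simp
  | cons x xs ih =>
    rw [List.length_cons, List.range_succ_eq_map]
    simp only [List.map_cons, List.map_map]
    exact congrArg _ (by simpa using ih)

theorem all_const {α : Type} (l : List α) (hl : l ≠ []) (c : Bool) :
    l.all (fun _ => c) = c := by
  cases l with
  | nil => exact absurd rfl hl
  | cons x xs => cases c <;> simp

-- a line with no ' ' cell: B's helper as balance-and-no-triple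
theorem pvValida_eq (cells : List String) (hn : " " ∉ cells) :
    pvValida cells =
      ((cells.countP (fun n => !(n == "1")) == cells.count "1") &&
       (!PySem.Chars.isIn "111".toList (PySem.Chars.join [] (cells.map String.toList)) &&
        !PySem.Chars.isIn "000".toList (PySem.Chars.join [] (cells.map String.toList)))) := by
  have hc : cells.contains " " = false := by simp_all
  have hs := pvCountSplit cells
  simp only [pvValida, hc, Bool.false_eq_true, if_false, PySem.List.count_eq]
  by_cases he : cells.countP (fun n => !(n == "1")) = cells.count "1"
  · rw [if_neg (by omega)]
    simp [he]
  · rw [if_pos (by omega)]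
    simp [he]

theorem pvValida_nospace (row : List String) (h : pvValida row = true) : " " ∉ row := by
  intro hm
  simp [pvValida] at h
  exact h.1 hm

-- all/any juggling for the final comparison
theorem all_and_not_any {α : Type} (l : List α) (p q r : α → Bool) :
    (l.all p && !(l.any q || l.any r)) = l.all (fun x => p x && (!q x && !r x)) := by
  rw [Bool.eq_iff_iff]
  simp only [Bool.and_eq_true, Bool.not_eq_true', Bool.or_eq_false_iff, List.all_eq_true,
    List.any_eq_false, Bool.and_eq_true, Bool.not_eq_true']
  aesop

-- a row that is declaratively invalid fails B's helper
theorem pvValida_false_of_bad (row : List String)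
    (hbad : " " ∈ row ∨ 2 * List.count "1" row ≠ row.length ∨
      "111".toList <:+: PySem.Chars.join [] (row.map String.toList) ∨
      "000".toList <:+: PySem.Chars.join [] (row.map String.toList)) :
    pvValida row = false := by
  by_cases hsp : " " ∈ row
  · simp [pvValida, hsp]
  · rw [pvValida_eq row hsp]
    rcases hbad with h | h | h | h
    · exact absurd h hsp
    · have := pvCountSplit row
      have hne : (row.countP (fun n => !(n == "1")) == row.count "1") = false := by
        simp; omega
      simp [hne]
    · rw [(PySem.Chars.isIn_iff_infix _ _).mpr h]
      simp
    · rw [(PySem.Chars.isIn_iff_infix _ _).mpr h]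
      simp

-- ===== VERDICT =====
theorem grilla_terminada_spec : Claim_equal_grilla_terminada := by
  unfold Claim_equal_grilla_terminada
  intro g _ hpre
  unfold Spec_grilla_terminada
  obtain ⟨hne, hcase⟩ := hpre
  unfold grilla_terminada grilla_terminada_alt
  rw [rows_eq]
  by_cases hrows : g.all pvValida = true
  case neg =>
    rw [Bool.not_eq_true] at hrows
    simp [hrows]
  case pos =>
    have hlen : ∀ row ∈ g, g.headI.length ≤ row.length := by
      rcases hcase with hlen | ⟨row, hrow, hbad⟩
      · exact hlen
      · have h1 := List.all_eq_true.mp hrows row hrow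
        rw [pvValida_false_of_bad row hbad] at h1
        exact absurd h1 (by simp)
    simp only [hrows, if_true, Bool.not_true, Bool.false_eq_true, if_false]
    have h0 : g.getD 0 [] = g.headI := by cases g <;> simp_all
    set ncols := (g.getD 0 []).length with hnc
    have hnospace : ∀ row ∈ g, " " ∉ row := by
      intro row hr
      exact pvValida_nospace row (by simpa using (List.all_eq_true.mp hrows row hr))
    have hns : ∀ f ∈ List.range ncols, ∀ c ∈ List.range g.length, pvCell g f c ≠ " " := by
      intro f hf c hc
      rw [List.mem_range] at hf hc
      have hrowlen : ncols ≤ (g[c]'hc).length := by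
        rw [hnc, h0]; exact hlen _ (List.getElem_mem hc)
      have hcell : pvCell g f c = (g[c]'hc)[f]'(by omega) := by
        simp [pvCell, List.getD_eq_getElem?_getD, List.getElem?_eq_getElem hc,
          List.getElem?_eq_getElem (show f < (g[c]'hc).length by omega)]
      intro hsp
      have hmem : " " ∈ g[c]'hc := by rw [← hsp, hcell]; exact List.getElem_mem _
      exact hnospace _ (List.getElem_mem hc) hmem
    by_cases hz : ncols = 0
    · simp [columna_es_valida, ← hnc, hz]
    · have hrange : List.range ncols ≠ [] := by
        simpa [List.range_eq_nil] using hz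
      have hA : (List.range ncols).all (fun col => columna_es_valida g (col : Int)) =
          pvColOuter g (List.range ncols) [' '] 0 0 := by
        rw [show (fun col : Nat => columna_es_valida g (col : Int)) =
            (fun _ : Nat => pvColOuter g (List.range ncols) [' '] 0 0) from rfl]
        exact all_const _ hrange _
      rw [hA, pvColOuter_eq g _ hns [' '] 0]
      have h111 : PySem.Chars.isIn "111".toList ([' '] ++ pvBlocks g (List.range ncols)) =
          (List.range ncols).any (fun f => PySem.Chars.isIn "111".toList (pvColJoin g f)) := by
        rw [show ([' '] ++ pvBlocks g (List.range ncols) : List Char) =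
            [] ++ ' ' :: pvBlocks g (List.range ncols) from rfl,
          isIn_split _ _ _ (by decide), isIn_blocks g _ (by decide) (by decide)]
        simp [PySem.Chars.isIn_iff_infix]
      have h000 : PySem.Chars.isIn "000".toList ([' '] ++ pvBlocks g (List.range ncols)) =
          (List.range ncols).any (fun f => PySem.Chars.isIn "000".toList (pvColJoin g f)) := by
        rw [show ([' '] ++ pvBlocks g (List.range ncols) : List Char) =
            [] ++ ' ' :: pvBlocks g (List.range ncols) from rfl,
          isIn_split _ _ _ (by decide), isIn_blocks g _ (by decide) (by decide)]
        simp [PySem.Chars.isIn_iff_infix]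
      have hiff : ∀ b : Bool, (if b = true then true else false) = b := by
        intro b; cases b <;> simp
      rw [h111, h000, all_and_not_any, hiff]
      have hcol : ∀ c ∈ List.range ncols,
          pvValida (g.map (fun fila => fila.getD c " ")) =
          (((pvColCells g c (List.range g.length)).countP (fun n => !(n == "1")) ==
             (pvColCells g c (List.range g.length)).count "1") &&
           (!PySem.Chars.isIn "111".toList (pvColJoin g c) &&
            !PySem.Chars.isIn "000".toList (pvColJoin g c))) := by
        intro c hc
        rw [List.mem_range] at hc
        have hmapeq : g.map (fun fila => fila.getD c " ") = pvColCells g c (List.range g.length) := by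
          simpa [pvColCells, pvCell] using (map_range_getD g (fun fila => fila.getD c " ") []).symm
        have hnosp : " " ∉ pvColCells g c (List.range g.length) := by
          intro hmem
          obtain ⟨r, hr, hcell⟩ := List.mem_map.mp hmem
          exact hns c (List.mem_range.mpr hc) r hr hcell
        rw [hmapeq, pvValida_eq _ hnosp, pvColJoin]
      rw [Bool.eq_iff_iff]
      simp only [List.all_eq_true]
      constructor
      · intro h c hc
        rw [hcol c hc]
        exact h c hc
      · intro h c hc
        have := h c hc
        rw [hcol c hc] at this
        exact this
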